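-- pv_equiv track=rewrite | github.com/ke103rga/diplom_text | product/insight_pulse/tooling/funnel/funnel.py | _segments_repeated_indexes
-- ===== SOURCE A (Python) =====
-- def _segments_repeated_indexes(segments):
--     segment_idx = set()
--
--     for segment in segments:
--         segment_set = set(segment)
--         if len(segment_idx.intersection(segment_set)) > 0:
--             return False
--         segment_idx = segment_idx.union(segment_set)
--     return True
-- ===== SOURCE B (Python) =====
-- def _segments_repeated_indexes(segments):
--     sets = [set(segment) for segment in segments]
--     total = sum(len(s) for s in sets)
--     all_idx = set().union(*sets)
--     return total == len(all_idx)
-- ===== Notes on version B (the rewrite author's own statement) =====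
-- stated objective: alternative
-- what changed: Replaces A's incremental intersection test with early exit by the counting identity: segments are pairwise disjoint iff the sum of per-segment distinct counts equals the size of the combined union.
import Mathlib
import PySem

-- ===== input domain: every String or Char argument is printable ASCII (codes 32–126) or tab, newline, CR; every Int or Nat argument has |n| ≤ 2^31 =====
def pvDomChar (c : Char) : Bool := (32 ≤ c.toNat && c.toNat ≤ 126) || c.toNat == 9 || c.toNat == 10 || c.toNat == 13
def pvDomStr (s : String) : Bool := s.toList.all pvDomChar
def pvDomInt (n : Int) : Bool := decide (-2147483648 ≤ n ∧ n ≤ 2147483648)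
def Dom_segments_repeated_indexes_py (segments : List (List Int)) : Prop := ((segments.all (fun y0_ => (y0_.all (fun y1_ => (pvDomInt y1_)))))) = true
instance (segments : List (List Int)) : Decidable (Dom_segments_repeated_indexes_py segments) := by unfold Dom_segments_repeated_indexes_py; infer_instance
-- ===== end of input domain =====

-- B replaces A's incremental intersection check (with early exit) by the counting identity:
-- segments are pairwise disjoint iff the sum of per-segment distinct counts equals the size of the union.


-- ===== PORT A =====
-- A's loop: accumulator set segment_idx; early return False on a non-empty intersection.
def pvGoA (acc : PySem.Set Int) : List (List Int) → Bool
  | [] => true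
  | seg :: rest =>
    let segmentSet := PySem.Set.ofList seg
    if PySem.Set.len (PySem.Set.inter acc segmentSet) > 0 then false
    else pvGoA (PySem.Set.union acc segmentSet) rest

def segments_repeated_indexes_py (segments : List (List Int)) : Bool :=
  pvGoA PySem.Set.empty segments

-- ===== PORT B =====
def segments_repeated_indexes_py_alt (segments : List (List Int)) : Bool :=
  let sets := segments.map (fun segment => PySem.Set.ofList segment)
  let total := (sets.map PySem.Set.len).sum
  let allIdx := sets.foldl (fun a s => PySem.Set.union a s) PySem.Set.empty
  total == PySem.Set.len allIdx

-- ===== PRECONDITION & SPEC =====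
def Spec_segments_repeated_indexes_py (segments : List (List Int)) (out : Bool) : Prop := out = segments_repeated_indexes_py_alt segments
instance (segments : List (List Int)) (out : Bool) : Decidable (Spec_segments_repeated_indexes_py segments out) := by unfold Spec_segments_repeated_indexes_py; infer_instance

-- ===== CLAIM (what is proved, stated in full; the proofs are below) =====
def Claim_equal_segments_repeated_indexes_py : Prop := ∀ (segments : List (List Int)), Dom_segments_repeated_indexes_py segments → Spec_segments_repeated_indexes_py segments (segments_repeated_indexes_py segments)

-- ===== LEMMAS AND PROOFS =====

-- length of a union is at most the sum of lengths
lemma pv_len_union_le (a : PySem.Set Int) (s : List Int) :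
    (PySem.Set.union a s).length ≤ a.length + s.length := by
  show (PySem.Set.update a s).length ≤ a.length + s.length
  rw [PySem.Set.update_eq_append_filter]
  have h1 := List.length_filter_le (fun y => !PySem.Set.contains a y) (PySem.Set.ofList s)
  have h2 := PySem.Set.length_ofList_le s
  simp only [List.length_append]
  omega

-- folding unions over the remaining segments cannot exceed the running sum of set sizes
lemma pv_foldl_union_len_le (rest : List (List Int)) :
    ∀ (a : PySem.Set Int),
      (rest.foldl (fun a s => PySem.Set.union a (PySem.Set.ofList s)) a).length ≤
        a.length + (rest.map (fun s => (PySem.Set.ofList s).length)).sum := by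
  induction rest with
  | nil => intro a; simp
  | cons s rest ih =>
    intro a
    simp only [List.foldl_cons, List.map_cons, List.sum_cons]
    have h1 := ih (PySem.Set.union a (PySem.Set.ofList s))
    have h2 := pv_len_union_le a (PySem.Set.ofList s)
    omega

-- disjoint union adds lengths exactly
lemma pv_len_union_disjoint (a : PySem.Set Int) (t : PySem.Set Int)
    (ht : t.Nodup) (hd : ∀ x ∈ t, x ∉ a) :
    (PySem.Set.union a t).length = a.length + t.length := by
  show (PySem.Set.update a t).length = a.length + t.length
  rw [PySem.Set.update_eq_append_of_disjoint a t ht hd, List.length_append]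

-- overlapping union is strictly smaller than the sum of lengths
lemma pv_len_union_lt (a : PySem.Set Int) (t : PySem.Set Int)
    (ht : t.Nodup) (x : Int) (hxt : x ∈ t) (hxa : x ∈ a) :
    (PySem.Set.union a t).length < a.length + t.length := by
  show (PySem.Set.update a t).length < a.length + t.length
  rw [PySem.Set.update_eq_append_filter, PySem.Set.ofList_eq_self_of_nodup t ht,
    List.length_append]
  have : (List.filter (fun y => !PySem.Set.contains a y) t).length < t.length := by
    rw [List.length_filter_lt_length_iff_exists]
    exact ⟨x, hxt, by simp [hxa]⟩
  omega

-- A's loop equals the counting identity, for any Nodup accumulator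
lemma pv_goA_eq (segs : List (List Int)) :
    ∀ (acc : PySem.Set Int), acc.Nodup →
      pvGoA acc segs =
        decide ((segs.map (fun s => (PySem.Set.ofList s).length)).sum + acc.length =
          (segs.foldl (fun a s => PySem.Set.union a (PySem.Set.ofList s)) acc).length) := by
  induction segs with
  | nil => intro acc _; simp [pvGoA]
  | cons seg rest ih =>
    intro acc hacc
    simp only [pvGoA, List.map_cons, List.sum_cons, List.foldl_cons]
    by_cases hov : ∃ x ∈ PySem.Set.ofList seg, x ∈ acc
    · obtain ⟨x, hxt, hxa⟩ := hov
      have hcond : PySem.Set.len (PySem.Set.inter acc (PySem.Set.ofList seg)) > 0 := by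
        have hmem : x ∈ List.filter (fun y => PySem.Set.contains (PySem.Set.ofList seg) y) acc :=
          List.mem_filter.mpr ⟨hxa, by simp [hxt]⟩
        have := List.length_pos_of_mem hmem
        show (0 : Int) < ((List.filter (fun y => PySem.Set.contains (PySem.Set.ofList seg) y) acc).length : Int)
        exact_mod_cast this
      rw [if_pos hcond]
      have hlt := pv_len_union_lt acc (PySem.Set.ofList seg) (PySem.Set.nodup_ofList seg) x hxt hxa
      have hle := pv_foldl_union_len_le rest (PySem.Set.union acc (PySem.Set.ofList seg))
      symm
      simp only [decide_eq_false_iff_not]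
      omega
    · push Not at hov
      have hcond : ¬ PySem.Set.len (PySem.Set.inter acc (PySem.Set.ofList seg)) > 0 := by
        have hnil : List.filter (fun y => PySem.Set.contains (PySem.Set.ofList seg) y) acc = [] := by
          rw [List.filter_eq_nil_iff]
          intro y hy
          simp only [PySem.Set.contains_eq_listContains]
          simp only [List.contains_iff_mem]
          intro hmem
          exact hov y hmem hy
        show ¬ (0 : Int) < ((List.filter (fun y => PySem.Set.contains (PySem.Set.ofList seg) y) acc).length : Int)
        rw [hnil]; simp
      rw [if_neg hcond]
      have hdisj : ∀ x ∈ PySem.Set.ofList seg, x ∉ acc := hov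
      have hlen := pv_len_union_disjoint acc (PySem.Set.ofList seg) (PySem.Set.nodup_ofList seg) hdisj
      rw [ih (PySem.Set.union acc (PySem.Set.ofList seg))
        (PySem.Set.nodup_union acc (PySem.Set.ofList seg) hacc)]
      rw [decide_eq_decide]
      omega

-- ===== VERDICT (by name: the statement is the Claim_ definition above) =====
theorem segments_repeated_indexes_py_spec : Claim_equal_segments_repeated_indexes_py := by
  intro segments _
  show segments_repeated_indexes_py segments = segments_repeated_indexes_py_alt segments
  unfold segments_repeated_indexes_py segments_repeated_indexes_py_alt
  simp only [List.foldl_map, List.map_map]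
  rw [pv_goA_eq segments PySem.Set.empty List.nodup_nil]
  have hsum : ((segments.map (fun s => PySem.Set.len (PySem.Set.ofList s) : List Int → Int)).sum) =
      (((segments.map (fun s => (PySem.Set.ofList s).length)).sum : Nat) : Int) := by
    rw [Nat.cast_list_sum, List.map_map]
    rfl
  show _ = ((segments.map (fun s => PySem.Set.len (PySem.Set.ofList s))).sum ==
    PySem.Set.len (segments.foldl (fun a s => PySem.Set.union a (PySem.Set.ofList s)) PySem.Set.empty))
  rw [show ∀ (x y : Int), (x == y) = decide (x = y) from fun _ _ => rfl]
  rw [hsum]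
  rw [decide_eq_decide]
  show _ ↔ (_ : Int) = ((_ : Nat) : Int)
  rw [Nat.cast_inj]
  simp [PySem.Set.empty]
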